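-- pv_equiv track=rewrite | github.com/jmonclard/MopScreens | LoRa/sendpunch.py | computeCRCD3
-- ===== SOURCE A (Python) =====
-- def computeCRCD3(u0, u1, u2, u3, u4, u5, u6, u7):
--     """
--     Calcul d'un CRC16 bits
--     """
--     tmp = u0
--     bs = [u1, u2, u3, u4, u5, u6, u7]
--     for val in bs:
--         for j in range(16):
--             if tmp & (1 << 15):
--                 tmp <<= 1
--                 if val & (1 << 15):
--                     tmp += 1
--                 tmp ^= 0x8005
--             else:
--                 tmp <<= 1
--                 if val & (1 << 15):
--                     tmp += 1
--             val <<= 1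
--     tmp &= 0xffff
--     return tmp
-- ===== SOURCE B (Python) =====
-- # Table-driven CRC16: precomputed 256-entry tables (built from the same bit rule)
-- # replace the 16-step bit loop per word by two table lookups per byte.
-- _MASK = 0xffff
--
-- def _bytestep(reg, byte):
--     # feed one byte MSB-first through the bit rule with a 16-bit register
--     for j in range(8):
--         bit = (byte >> (7 - j)) & 1
--         fb = 0x8005 if reg & 0x8000 else 0
--         reg = (((reg << 1) | bit) ^ fb) & _MASK
--     return reg
--
-- _T_IN = [_bytestep(0, b) for b in range(256)]
-- _T_HI = [_bytestep(h << 8, 0) for h in range(256)]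
-- _T_LO = [_bytestep(l, 0) for l in range(256)]
--
-- def computeCRCD3(u0, u1, u2, u3, u4, u5, u6, u7):
--     reg = u0 & _MASK
--     for val in (u1, u2, u3, u4, u5, u6, u7):
--         v = val & _MASK
--         for byte in (v >> 8, v & 0xff):
--             reg = _T_HI[reg >> 8] ^ _T_LO[reg & 0xff] ^ _T_IN[byte]
--     return reg
-- ===== Notes on version B (the rewrite author's own statement) =====
-- stated objective: alternative
-- what changed: Replaces the 16-iteration per-word bit loop (with unbounded register and shifting input) by precomputed 256-entry lookup tables: the register is kept masked to 16 bits and updated per byte as T_HI[reg>>8] ^ T_LO[reg&0xff] ^ T_IN[byte], exploiting the GF(2)-linearity of the bit rule.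
import Mathlib
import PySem

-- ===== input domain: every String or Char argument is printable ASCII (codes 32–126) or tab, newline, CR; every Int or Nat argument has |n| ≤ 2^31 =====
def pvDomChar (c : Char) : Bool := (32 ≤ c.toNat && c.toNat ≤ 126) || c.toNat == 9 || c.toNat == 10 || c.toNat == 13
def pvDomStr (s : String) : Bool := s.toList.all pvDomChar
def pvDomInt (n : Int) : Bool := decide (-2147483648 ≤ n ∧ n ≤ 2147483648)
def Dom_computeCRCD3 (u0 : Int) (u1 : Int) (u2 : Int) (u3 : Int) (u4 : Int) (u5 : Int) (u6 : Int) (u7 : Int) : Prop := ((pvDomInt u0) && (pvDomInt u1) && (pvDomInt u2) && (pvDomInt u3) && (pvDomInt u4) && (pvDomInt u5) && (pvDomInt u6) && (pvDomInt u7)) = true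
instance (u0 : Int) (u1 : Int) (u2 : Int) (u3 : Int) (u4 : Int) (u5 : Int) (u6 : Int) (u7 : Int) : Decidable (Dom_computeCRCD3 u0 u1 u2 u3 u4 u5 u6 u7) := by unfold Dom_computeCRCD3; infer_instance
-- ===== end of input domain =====

-- B replaces A's per-word 16-step bit loop (unbounded register, shifted input) by
-- precomputed 256-entry lookup tables applied per byte of the 16-bit-masked register
-- (alternative algorithm, same exact result).

-- ===== PORT A =====
-- inner loop body of A: state (tmp, val); Python '<<' is '<<<', '&'/'^' are PySem.Int.band/bxor
def pvAInner (s : Int × Int) (_j : Nat) : Int × Int :=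
  let tmp := s.1
  let val := s.2
  let tmp :=
    if PySem.Int.band tmp ((1:Int) <<< (15:Nat)) ≠ 0 then
      let tmp := tmp <<< (1:Nat)
      let tmp := if PySem.Int.band val ((1:Int) <<< (15:Nat)) ≠ 0 then tmp + 1 else tmp
      PySem.Int.bxor tmp 32773          -- 0x8005
    else
      let tmp := tmp <<< (1:Nat)
      if PySem.Int.band val ((1:Int) <<< (15:Nat)) ≠ 0 then tmp + 1 else tmp
  (tmp, val <<< (1:Nat))

def computeCRCD3 (u0 : Int) (u1 : Int) (u2 : Int) (u3 : Int) (u4 : Int) (u5 : Int) (u6 : Int) (u7 : Int) : Int :=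
  let tmp := u0
  let bs := [u1, u2, u3, u4, u5, u6, u7]
  let tmp := bs.foldl (fun tmp val => ((List.range 16).foldl pvAInner (tmp, val)).1) tmp
  PySem.Int.band tmp 65535              -- 0xffff

-- ===== PORT B =====
-- Source B _bytestep: feed one byte MSB-first through the bit rule with a 16-bit register
def pvByteStep (reg : Nat) (byte : Nat) : Nat :=
  (List.range 8).foldl (fun reg j =>
    let bit := (byte >>> (7 - j)) &&& 1
    let fb := if reg &&& 32768 ≠ 0 then 32773 else 0
    ((reg <<< 1 ||| bit) ^^^ fb) &&& 65535) reg

def pvTIn : List Nat := (List.range 256).map (fun b => pvByteStep 0 b)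
def pvTHi : List Nat := (List.range 256).map (fun h => pvByteStep (h <<< 8) 0)
def pvTLo : List Nat := (List.range 256).map (fun l => pvByteStep l 0)

-- one table-driven register update (body of Source B's inner 'for byte' loop)
def pvTblByte (reg : Nat) (byte : Nat) : Nat :=
  pvTHi.getD (reg >>> 8) 0 ^^^ pvTLo.getD (reg &&& 255) 0 ^^^ pvTIn.getD byte 0

-- body of Source B's 'for val' loop: high byte then low byte of the masked word
def pvWordB (reg : Nat) (val : Int) : Nat :=
  let v : Nat := (PySem.Int.band val 65535).toNat
  [v >>> 8, v &&& 255].foldl pvTblByte reg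

def computeCRCD3_alt (u0 : Int) (u1 : Int) (u2 : Int) (u3 : Int) (u4 : Int) (u5 : Int) (u6 : Int) (u7 : Int) : Int :=
  let reg : Nat := (PySem.Int.band u0 65535).toNat
  let reg := [u1, u2, u3, u4, u5, u6, u7].foldl pvWordB reg
  (reg : Int)

-- ===== PRECONDITION & SPEC =====
def Spec_computeCRCD3 (u0 : Int) (u1 : Int) (u2 : Int) (u3 : Int) (u4 : Int) (u5 : Int) (u6 : Int) (u7 : Int) (out : Int) : Prop := out = computeCRCD3_alt u0 u1 u2 u3 u4 u5 u6 u7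
instance (u0 : Int) (u1 : Int) (u2 : Int) (u3 : Int) (u4 : Int) (u5 : Int) (u6 : Int) (u7 : Int) (out : Int) : Decidable (Spec_computeCRCD3 u0 u1 u2 u3 u4 u5 u6 u7 out) := by unfold Spec_computeCRCD3; infer_instance

-- ===== CLAIM (what is proved, stated in full; the proofs are below) =====
def Claim_equal_computeCRCD3 : Prop := ∀ (u0 : Int) (u1 : Int) (u2 : Int) (u3 : Int) (u4 : Int) (u5 : Int) (u6 : Int) (u7 : Int), Dom_computeCRCD3 u0 u1 u2 u3 u4 u5 u6 u7 → Spec_computeCRCD3 u0 u1 u2 u3 u4 u5 u6 u7 (computeCRCD3 u0 u1 u2 u3 u4 u5 u6 u7)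

-- ===== LEMMAS AND PROOFS =====

-- the 16-bit masked value of a Python int, and the abstract one-bit CRC step on it
def mask16 (t : Int) : Nat := (PySem.Int.band t 65535).toNat

def stp (r : Nat) (b : Bool) : Nat :=
  ((2 * r + (if b then 1 else 0)) % 65536) ^^^ (if r.testBit 15 then 32773 else 0)

def crcBits (r : Nat) (bs : List Bool) : Nat := bs.foldl stp r

def bw8 (b : Nat) : List Bool := (List.range 8).map (fun j => b.testBit (7 - j))
def bw16 (w : Nat) : List Bool := (List.range 16).map (fun j => w.testBit (15 - j))

theorem crcBits_append (r : Nat) (l1 l2 : List Bool) :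
    crcBits r (l1 ++ l2) = crcBits (crcBits r l1) l2 := List.foldl_append

-- ---- generic Nat bit lemmas ----
theorem land_two_pow_sub_one (x n : Nat) : x &&& (2 ^ n - 1) = x % 2 ^ n := by
  apply Nat.eq_of_testBit_eq
  intro i
  simp [Nat.testBit_and, Nat.testBit_two_pow_sub_one, Nat.testBit_mod_two_pow, Bool.and_comm]

theorem land_65535 (x : Nat) : x &&& 65535 = x % 65536 := by
  have h := land_two_pow_sub_one x 16
  norm_num at h
  exact h

theorem land_255 (x : Nat) : x &&& 255 = x % 256 := by
  have h := land_two_pow_sub_one x 8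
  norm_num at h
  exact h

theorem mod_two_pow_xor2 (a b n : Nat) : (a ^^^ b) % 2 ^ n = (a % 2 ^ n) ^^^ (b % 2 ^ n) := by
  apply Nat.eq_of_testBit_eq
  intro i
  simp only [Nat.testBit_mod_two_pow, Nat.testBit_xor]
  by_cases hi : i < n <;> simp [hi]

theorem mod_65536_xor (x c : Nat) (hc : c < 65536) : (x ^^^ c) % 65536 = (x % 65536) ^^^ c := by
  have h := mod_two_pow_xor2 x c 16
  norm_num at h
  rw [h, Nat.mod_eq_of_lt hc]

theorem xor_bit_split (a b i j : Nat) (hi : i ≤ 1) (hj : j ≤ 1) :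
    (2 * a + i) ^^^ (2 * b + j) = 2 * (a ^^^ b) + (i ^^^ j) := by
  have hij : i ^^^ j ≤ 1 := by interval_cases i <;> interval_cases j <;> decide
  apply Nat.eq_of_testBit_eq
  intro k
  cases k with
  | zero =>
      rw [Nat.testBit_xor, Nat.testBit_zero, Nat.testBit_zero, Nat.testBit_zero]
      rw [show (2*a+i) % 2 = i by omega, show (2*b+j) % 2 = j by omega,
          show (2*(a ^^^ b)+(i ^^^ j)) % 2 = i ^^^ j by omega]
      interval_cases i <;> interval_cases j <;> decide
  | succ k =>
      rw [Nat.testBit_xor, Nat.testBit_add_one, Nat.testBit_add_one, Nat.testBit_add_one,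
          show (2*a+i)/2 = a by omega, show (2*b+j)/2 = b by omega,
          show (2*(a ^^^ b)+(i ^^^ j))/2 = a ^^^ b by omega,
          Nat.testBit_xor]

theorem two_pow_sub_one_sub_eq_xor (n : Nat) : ∀ y, y < 2 ^ n → 2 ^ n - 1 - y = (2 ^ n - 1) ^^^ y := by
  induction n with
  | zero => intro y hy; interval_cases y; simp
  | succ n ih =>
      intro y hy
      have hp : 2 ^ (n+1) = 2 * 2 ^ n := by rw [pow_succ]; ring
      have h2 : 2 ^ (n+1) - 1 = 2 * (2 ^ n - 1) + 1 := by
        have := Nat.one_le_two_pow (n := n); omega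
      have hy2 : y / 2 < 2 ^ n := by omega
      have hsplit : y = 2 * (y / 2) + y % 2 := by omega
      calc 2 ^ (n+1) - 1 - y = 2 * (2 ^ n - 1 - y / 2) + (1 - y % 2) := by omega
        _ = 2 * ((2 ^ n - 1) ^^^ (y / 2)) + (1 ^^^ y % 2) := by
              rw [← ih (y / 2) hy2]
              rcases Nat.mod_two_eq_zero_or_one y with h | h <;> rw [h] <;> rfl
        _ = (2 ^ (n+1) - 1) ^^^ y := by
              rw [h2]
              conv_rhs => rw [hsplit]
              rw [xor_bit_split _ _ _ _ (by omega) (by omega)]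

theorem compl16 (y : Nat) (hy : y < 65536) : 65535 - y = 65535 ^^^ y := by
  have h := two_pow_sub_one_sub_eq_xor 16 y (by norm_num; omega)
  norm_num at h
  exact h

theorem testBit15_iff (z : Nat) (hz : z < 65536) : z.testBit 15 = decide (32768 ≤ z) := by
  have h1 : z.testBit 15 = (z >>> 15).testBit 0 := by
    rw [Nat.testBit_shiftRight]
  rw [h1, Nat.testBit_zero, Nat.shiftRight_eq_div_pow]
  norm_num
  constructor <;> intro h <;> omega

-- ---- mask16 on the two signs ----
theorem band65535_ofNat (n : Nat) : PySem.Int.band (Int.ofNat n) 65535 = ((n % 65536 : Nat) : Int) := by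
  rw [show (Int.ofNat n) = ((n : Nat) : Int) from rfl,
      show (65535 : Int) = ((65535 : Nat) : Int) from rfl,
      PySem.Int.band_natCast, land_65535]

theorem mask16_ofNat (n : Nat) : mask16 (Int.ofNat n) = n % 65536 := by
  rw [mask16, band65535_ofNat, Int.toNat_natCast]

theorem mask16_negSucc (m : Nat) : mask16 (Int.negSucc m) = 65535 - m % 65536 := by
  have h1 : ¬ ((0:Int) ≤ Int.negSucc m) := by simp
  have h2 : (-Int.negSucc m - 1) = (m:Int) := by simp [Int.negSucc_eq]
  simp [mask16, PySem.Int.band, h1, h2]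
  rw [Nat.and_comm 65535 m, land_65535]

theorem mask16_lt (t : Int) : mask16 t < 65536 := by
  cases t with
  | ofNat n => rw [mask16_ofNat]; omega
  | negSucc m => rw [mask16_negSucc]; omega

theorem band_mask_repr (t : Int) : PySem.Int.band t 65535 = Int.ofNat (mask16 t) := by
  cases t with
  | ofNat n =>
      rw [band65535_ofNat, mask16_ofNat]
      rfl
  | negSucc m =>
      have h1 : ¬ ((0:Int) ≤ Int.negSucc m) := by simp
      have h2 : (-Int.negSucc m - 1) = (m:Int) := by simp [Int.negSucc_eq]
      rw [mask16_negSucc]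
      simp [PySem.Int.band, h1, h2]
      rw [Nat.and_comm 65535 m, land_65535]

-- ---- the Python '& (1 << 15)' test reads bit 15 of the masked value ----
theorem cond_iff (t : Int) : (PySem.Int.band t ((1:Int) <<< (15:Nat)) ≠ 0) ↔ (mask16 t).testBit 15 = true := by
  have hs : ((1:Int) <<< (15:Nat)) = (32768:Int) := rfl
  rw [hs]
  cases t with
  | ofNat n =>
      have hb : PySem.Int.band (Int.ofNat n) 32768 = ((n &&& 32768 : Nat) : Int) := by
        have := PySem.Int.band_natCast n 32768
        simpa using this
      rw [hb, mask16_ofNat]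
      have h15 : n &&& 32768 = (n.testBit 15).toNat * 32768 := by
        have := Nat.and_two_pow n 15
        norm_num at this
        exact this
      have hmod : (n % 65536).testBit 15 = n.testBit 15 := by
        have := Nat.testBit_mod_two_pow n 16 15
        norm_num at this
        exact this
      rw [hmod]
      cases hn : n.testBit 15 <;> simp [h15, hn]
  | negSucc m =>
      have h1 : ¬ ((0:Int) ≤ Int.negSucc m) := by simp
      have h2 : (-Int.negSucc m - 1) = (m:Int) := by simp [Int.negSucc_eq]
      have hb : PySem.Int.band (Int.negSucc m) 32768 = ((32768 - (32768 &&& m) : Nat) : Int) := by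
        simp [PySem.Int.band, h1, h2]
      rw [hb, mask16_negSucc, testBit15_iff _ (by omega)]
      have h15 : 32768 &&& m = (m.testBit 15).toNat * 32768 := by
        rw [Nat.and_comm]
        have := Nat.and_two_pow m 15
        norm_num at this
        exact this
      have hmb : m.testBit 15 = decide (32768 ≤ m % 65536) := by
        have hmod : (m % 65536).testBit 15 = m.testBit 15 := by
          have := Nat.testBit_mod_two_pow m 16 15
          norm_num at this
          exact this
        rw [← hmod, testBit15_iff _ (by omega)]
      rw [h15, hmb]
      rcases Nat.lt_or_ge (m % 65536) 32768 with h | h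
      · rw [decide_eq_false (by omega), decide_eq_true (by omega)]
        simp
      · rw [decide_eq_true h, decide_eq_false (by omega)]
        simp

-- shifting left by one is doubling, on both signs
theorem shl1_eq (t : Int) : t <<< (1:Nat) = t * 2 := by
  cases t with
  | ofNat n =>
      show Int.ofNat (n <<< 1) = _
      rw [Nat.shiftLeft_eq, show (Int.ofNat n) = ((n : Nat) : Int) from rfl,
          show Int.ofNat (n * 2 ^ 1) = ((n * 2 ^ 1 : Nat) : Int) from rfl]
      push_cast
      ring
  | negSucc m =>
      show Int.negSucc ((m+1) <<< 1 - 1) = _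
      rw [Nat.shiftLeft_eq]
      rw [show (m+1) * 2 ^ 1 - 1 = 2*m + 1 by omega]
      rw [Int.negSucc_eq, Int.negSucc_eq]
      push_cast
      ring

theorem mask16_double (t : Int) (b : Nat) (hb : b ≤ 1) :
    mask16 (t * 2 + (b : Int)) = (2 * mask16 t + b) % 65536 := by
  cases t with
  | ofNat n =>
      have h : (Int.ofNat n) * 2 + (b : Int) = Int.ofNat (2 * n + b) := by
        rw [show (Int.ofNat n) = ((n : Nat) : Int) from rfl,
            show Int.ofNat (2 * n + b) = ((2 * n + b : Nat) : Int) from rfl]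
        push_cast
        ring
      rw [h, mask16_ofNat, mask16_ofNat]
      omega
  | negSucc m =>
      have h : (Int.negSucc m) * 2 + (b : Int) = Int.negSucc (2 * m + 1 - b) := by
        rw [Int.negSucc_eq, Int.negSucc_eq]
        push_cast
        omega
      rw [h, mask16_negSucc, mask16_negSucc]
      omega

theorem mask16_double0 (t : Int) : mask16 (t * 2) = (2 * mask16 t) % 65536 := by
  have := mask16_double t 0 (by omega)
  simpa using this

theorem mask16_double1 (t : Int) : mask16 (t * 2 + 1) = (2 * mask16 t + 1) % 65536 := by
  have := mask16_double t 1 (by omega)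
  simpa using this

-- Python '^ 0x8005' on the masked value
theorem mask16_xor (t : Int) : mask16 (PySem.Int.bxor t 32773) = mask16 t ^^^ 32773 := by
  cases t with
  | ofNat n =>
      have hb : PySem.Int.bxor (Int.ofNat n) 32773 = Int.ofNat (n ^^^ 32773) := by
        have := PySem.Int.bxor_natCast n 32773
        simpa using this
      rw [hb, mask16_ofNat, mask16_ofNat]
      exact mod_65536_xor n 32773 (by norm_num)
  | negSucc m =>
      have h1 : ¬ ((0:Int) ≤ Int.negSucc m) := by simp
      have h2 : (-Int.negSucc m - 1) = (m:Int) := by simp [Int.negSucc_eq]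
      have hb : PySem.Int.bxor (Int.negSucc m) 32773 = Int.negSucc (m ^^^ 32773) := by
        simp [PySem.Int.bxor, h1, h2]
        rw [Int.negSucc_eq]
        push_cast
        ring
      rw [hb, mask16_negSucc, mask16_negSucc]
      rw [mod_65536_xor m 32773 (by norm_num)]
      have hx : m % 65536 ^^^ 32773 < 65536 := by
        have h := Nat.xor_lt_two_pow (n := 16) (x := m % 65536) (y := 32773) (by norm_num; omega) (by norm_num)
        norm_num at h
        omega
      rw [compl16 _ hx, compl16 _ (by omega)]
      rw [Nat.xor_assoc]

-- ---- A's inner-loop body in the masked world is exactly one stp step ----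
theorem stepA (s : Int × Int) (j : Nat) :
    mask16 (pvAInner s j).1 = stp (mask16 s.1) ((mask16 s.2).testBit 15) ∧
    (pvAInner s j).2 = s.2 * 2 := by
  obtain ⟨t, v⟩ := s
  have h1 := cond_iff t
  have h2 := cond_iff v
  constructor
  · show mask16 ((pvAInner (t, v) j).1) = stp (mask16 t) ((mask16 v).testBit 15)
    simp only [pvAInner, stp]
    by_cases c1 : PySem.Int.band t ((1:Int) <<< (15:Nat)) ≠ 0 <;>
      by_cases c2 : PySem.Int.band v ((1:Int) <<< (15:Nat)) ≠ 0
    · rw [if_pos c1, if_pos c2, if_pos (h1.mp c1), if_pos (h2.mp c2),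
          shl1_eq, mask16_xor, mask16_double1]
    · rw [if_pos c1, if_neg c2, if_pos (h1.mp c1),
          if_neg (show ¬ ((mask16 v).testBit 15 = true) from fun hc => c2 (h2.mpr hc)),
          shl1_eq, mask16_xor, mask16_double0, Nat.add_zero]
    · rw [if_neg c1, if_pos c2,
          if_neg (show ¬ ((mask16 t).testBit 15 = true) from fun hc => c1 (h1.mpr hc)),
          if_pos (h2.mp c2), shl1_eq, mask16_double1, Nat.xor_zero]
    · rw [if_neg c1, if_neg c2,
          if_neg (show ¬ ((mask16 t).testBit 15 = true) from fun hc => c1 (h1.mpr hc)),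
          if_neg (show ¬ ((mask16 v).testBit 15 = true) from fun hc => c2 (h2.mpr hc)),
          shl1_eq, mask16_double0, Nat.xor_zero, Nat.add_zero]
  · show (pvAInner (t, v) j).2 = v * 2
    simp only [pvAInner]
    exact shl1_eq v

theorem mask16_mul_pow (v : Int) (j : Nat) : mask16 (v * 2 ^ j) = (mask16 v * 2 ^ j) % 65536 := by
  induction j with
  | zero => simp [Nat.mod_eq_of_lt (mask16_lt v)]
  | succ j ih =>
      have h1 : v * 2 ^ (j+1) = (v * 2 ^ j) * 2 := by ring
      rw [h1, mask16_double0, ih]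
      have h2 : (mask16 v) * 2 ^ (j+1) = (mask16 v * 2 ^ j) * 2 := by ring
      rw [h2]
      omega

theorem innerA (t v : Int) : ∀ k : Nat,
    (((List.range k).foldl pvAInner (t, v)).2 = v * 2 ^ k) ∧
    mask16 (((List.range k).foldl pvAInner (t, v)).1) =
      crcBits (mask16 t) ((List.range k).map (fun j => (mask16 (v * 2 ^ j)).testBit 15)) := by
  intro k
  induction k with
  | zero => simp [crcBits]
  | succ k ih =>
      obtain ⟨ih2, ih1⟩ := ih
      rw [List.range_succ, List.foldl_append, List.map_append, crcBits_append]
      constructor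
      · simp only [List.foldl_cons, List.foldl_nil]
        rw [(stepA _ k).2, ih2]
        ring
      · simp only [List.foldl_cons, List.foldl_nil, List.map_cons, List.map_nil]
        have hst := (stepA ((List.range k).foldl pvAInner (t, v)) k).1
        rw [hst, ih1, ih2]
        rfl

theorem wordA (t v : Int) :
    mask16 (((List.range 16).foldl pvAInner (t, v)).1) = crcBits (mask16 t) (bw16 (mask16 v)) := by
  rw [(innerA t v 16).2]
  congr 1
  unfold bw16
  apply List.map_congr_left
  intro j hj
  have hj16 : j < 16 := List.mem_range.mp hj
  rw [mask16_mul_pow]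
  have h1 : ((mask16 v * 2 ^ j) % 65536).testBit 15 = (mask16 v * 2 ^ j).testBit 15 := by
    have := Nat.testBit_mod_two_pow (mask16 v * 2 ^ j) 16 15
    norm_num at this
    exact this
  rw [h1, ← Nat.shiftLeft_eq, Nat.testBit_shiftLeft]
  simp [show 15 ≥ j by omega]

-- ---- B side ----
theorem getD_map_range (f : Nat → Nat) (i : Nat) (h : i < 256) :
    (((List.range 256).map f).getD i 0) = f i := by
  rw [List.getD_eq_getElem?_getD, List.getElem?_map, List.getElem?_range h]
  rfl

theorem nat_cond (r : Nat) : (r &&& 32768 ≠ 0) ↔ r.testBit 15 = true := by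
  have h15 : r &&& 32768 = (r.testBit 15).toNat * 32768 := by
    have := Nat.and_two_pow r 15
    norm_num at this
    exact this
  cases hr : r.testBit 15 <;> simp [h15, hr]

theorem or_one_eq (r : Nat) : r <<< 1 ||| 1 = 2 * r + 1 := by
  apply Nat.eq_of_testBit_eq
  intro i
  cases i with
  | zero =>
      simp [Nat.testBit_or, Nat.testBit_zero, Nat.testBit_shiftLeft]
  | succ i =>
      have h1 : (2*r+1).testBit (i+1) = r.testBit i := by
        rw [Nat.testBit_add_one, show (2*r+1)/2 = r by omega]
      have h2 : ((1:Nat)).testBit (i+1) = false := by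
        rw [Nat.testBit_add_one]
        simp
      rw [Nat.testBit_or, Nat.testBit_shiftLeft, h1, h2, show i+1-1 = i by omega]
      simp [show i+1 ≥ 1 by omega]

theorem pvByteStep_step (r b j : Nat) :
    ((r <<< 1 ||| ((b >>> (7 - j)) &&& 1)) ^^^ (if r &&& 32768 ≠ 0 then 32773 else 0)) &&& 65535
      = stp r (b.testBit (7 - j)) := by
  have hbit : (b >>> (7 - j)) &&& 1 = if b.testBit (7 - j) then 1 else 0 := by
    rw [Nat.and_one_is_mod]
    have ht : b.testBit (7 - j) = (b >>> (7-j)).testBit 0 := by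
      rw [Nat.testBit_shiftRight]
      norm_num
    rw [ht, Nat.testBit_zero]
    rcases Nat.mod_two_eq_zero_or_one (b >>> (7-j)) with h | h <;> simp [h]
  have hcond : (if r &&& 32768 ≠ 0 then (32773:Nat) else 0) = (if r.testBit 15 then 32773 else 0) := by
    by_cases h : r &&& 32768 ≠ 0
    · rw [if_pos h, if_pos ((nat_cond r).mp h)]
    · rw [if_neg h]
      have hn : ¬ (r.testBit 15 = true) := fun hc => h ((nat_cond r).mpr hc)
      simp [hn]
  rw [hbit, hcond]
  have hor : (r <<< 1 ||| (if b.testBit (7-j) then 1 else 0)) = 2 * r + (if b.testBit (7-j) then 1 else 0) := by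
    cases hb : b.testBit (7 - j)
    · simp [Nat.shiftLeft_eq]
      ring
    · simp only [ite_true, if_pos]
      exact or_one_eq r
  rw [hor, land_65535, stp]
  rcases hr : r.testBit 15 <;>
    simp [mod_65536_xor _ 32773 (by norm_num)]

theorem foldl_congr_elts {α β : Type} (f g : α → β → α) (l : List β)
    (h : ∀ a b, b ∈ l → f a b = g a b) : ∀ init, l.foldl f init = l.foldl g init := by
  induction l with
  | nil => intro init; rfl
  | cons x xs ih =>
      intro init
      rw [List.foldl_cons, List.foldl_cons, h _ _ (by simp)]
      exact ih (fun a b hb => h a b (by simp [hb])) _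

theorem pvByteStep_eq (r b : Nat) : pvByteStep r b = crcBits r (bw8 b) := by
  unfold pvByteStep crcBits bw8
  rw [List.foldl_map]
  exact foldl_congr_elts _ _ _ (fun a j _ => by
    simpa using pvByteStep_step a b j) r

-- linearity of the CRC step over GF(2)
theorem stp_lin (x y : Nat) (b c : Bool) : stp (x ^^^ y) (b ^^ c) = stp x b ^^^ stp y c := by
  unfold stp
  have he : (if (b ^^ c) then (1:Nat) else 0) = (if b then 1 else 0) ^^^ (if c then 1 else 0) := by
    cases b <;> cases c <;> rfl
  have hf : (if (x ^^^ y).testBit 15 then (32773:Nat) else 0)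
      = (if x.testBit 15 then 32773 else 0) ^^^ (if y.testBit 15 then 32773 else 0) := by
    rw [Nat.testBit_xor]
    cases hx : x.testBit 15 <;> cases hy : y.testBit 15 <;> simp
  rw [he, hf,
      ← xor_bit_split x y _ _ (by split <;> omega) (by split <;> omega)]
  have hm := mod_two_pow_xor2 (2 * x + (if b then 1 else 0)) (2 * y + (if c then 1 else 0)) 16
  norm_num at hm
  rw [hm]
  simp [Nat.xor_assoc, Nat.xor_comm, Nat.xor_left_comm]

theorem crcBits_lin : ∀ (bs cs : List Bool) (x y : Nat), bs.length = cs.length →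
    crcBits (x ^^^ y) (List.zipWith (fun p q => p ^^ q) bs cs) = crcBits x bs ^^^ crcBits y cs := by
  intro bs
  induction bs with
  | nil =>
      intro cs x y h
      cases cs with
      | nil => rfl
      | cons c cs => simp at h
  | cons b bs ih =>
      intro cs x y h
      cases cs with
      | nil => simp at h
      | cons c cs =>
          simp only [List.zipWith_cons_cons]
          show crcBits (stp (x ^^^ y) (b ^^ c)) _ = _
          rw [stp_lin]
          exact ih cs _ _ (by simpa using h)

theorem zipWith_self_map {α β : Type} (f : α → α → β) (l : List α) :
    List.zipWith f l l = l.map (fun a => f a a) := by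
  induction l with
  | nil => rfl
  | cons x xs ih => simp [ih]

theorem zip_bw8 (a c : Nat) :
    List.zipWith (fun p q => p ^^ q) (bw8 a) (bw8 c) = bw8 (a ^^^ c) := by
  unfold bw8
  rw [List.zipWith_map_left, List.zipWith_map_right, zipWith_self_map]
  apply List.map_congr_left
  intro j _
  rw [Nat.testBit_xor]

theorem bw8_length (a : Nat) : (bw8 a).length = 8 := by simp [bw8]

theorem crcBits_split (r b : Nat) :
    crcBits r (bw8 b) = crcBits r (bw8 0) ^^^ crcBits 0 (bw8 b) := by
  have h := crcBits_lin (bw8 0) (bw8 b) r 0 (by simp [bw8_length])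
  rw [zip_bw8] at h
  simpa using h

theorem split_hi_lo (r : Nat) : ((r >>> 8) <<< 8) ^^^ (r &&& 255) = r := by
  apply Nat.eq_of_testBit_eq
  intro i
  simp only [Nat.testBit_xor, Nat.testBit_shiftLeft, Nat.testBit_shiftRight, Nat.testBit_and]
  by_cases hi : 8 ≤ i
  · rw [show 8 + (i - 8) = i by omega]
    have h255 : (255:Nat).testBit i = false := Nat.testBit_lt_two_pow (by
      calc (255:Nat) < 2^8 := by norm_num
        _ ≤ 2^i := Nat.pow_le_pow_right (by norm_num) hi)
    simp [hi, h255]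
  · have h255 : (255:Nat).testBit i = true := by
      have h := Nat.testBit_two_pow_sub_one 8 i
      norm_num at h
      rw [h]
      simp [show i < 8 by omega]
    simp [hi, h255]

theorem table_step (r b : Nat) (hr : r < 65536) (hb : b < 256) :
    pvTblByte r b = crcBits r (bw8 b) := by
  have hhi : r >>> 8 < 256 := by rw [Nat.shiftRight_eq_div_pow]; omega
  have hlo : r &&& 255 < 256 := by rw [land_255]; omega
  unfold pvTblByte pvTHi pvTLo pvTIn
  rw [getD_map_range _ _ hhi, getD_map_range _ _ hlo, getD_map_range _ _ hb]
  rw [pvByteStep_eq, pvByteStep_eq, pvByteStep_eq]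
  rw [crcBits_split r b]
  congr 1
  have h := crcBits_lin (bw8 0) (bw8 0) ((r >>> 8) <<< 8) (r &&& 255) rfl
  rw [zip_bw8, split_hi_lo] at h
  rw [show (0:Nat) ^^^ 0 = 0 from rfl] at h
  exact h.symm

theorem stp_lt (r : Nat) (b : Bool) : stp r b < 65536 := by
  unfold stp
  have h1 : (2 * r + (if b then 1 else 0)) % 65536 < 65536 := by omega
  have h := Nat.xor_lt_two_pow (n := 16) (x := (2 * r + (if b then 1 else 0)) % 65536)
    (y := (if r.testBit 15 then 32773 else 0)) (by norm_num; omega) (by split <;> norm_num)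
  norm_num at h
  exact h

theorem crcBits_lt (bs : List Bool) : ∀ r : Nat, r < 65536 → crcBits r bs < 65536 := by
  induction bs with
  | nil => intro r h; exact h
  | cons b bs ih => intro r _; exact ih _ (stp_lt r b)

theorem bw16_eq_append (v : Nat) : bw8 (v >>> 8) ++ bw8 (v &&& 255) = bw16 v := by
  unfold bw8 bw16
  rw [show (16:Nat) = 8 + 8 from rfl, List.range_add, List.map_append, List.map_map]
  congr 1
  · apply List.map_congr_left
    intro j hj
    have hj8 : j < 8 := List.mem_range.mp hj
    show (v &&& 255).testBit (7 - j) = v.testBit (15 - (8 + j))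
    rw [show 15 - (8 + j) = 7 - j by omega, Nat.testBit_and]
    have h255 : (255:Nat).testBit (7 - j) = true := by
      have h := Nat.testBit_two_pow_sub_one 8 (7 - j)
      norm_num at h
      rw [h]
      simp [show 7 - j < 8 by omega]
    simp [h255]

theorem toNat_band_eq_mask16 (t : Int) : (PySem.Int.band t 65535).toNat = mask16 t := rfl

theorem wordB (r : Nat) (v : Int) (hr : r < 65536) :
    pvWordB r v = crcBits r (bw16 (mask16 v)) := by
  unfold pvWordB
  simp only [toNat_band_eq_mask16, List.foldl_cons, List.foldl_nil]
  have hv := mask16_lt v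
  have hb1 : mask16 v >>> 8 < 256 := by rw [Nat.shiftRight_eq_div_pow]; omega
  have hb2 : mask16 v &&& 255 < 256 := by rw [land_255]; omega
  rw [table_step r _ hr hb1, table_step _ _ (crcBits_lt _ r hr) hb2,
      ← bw16_eq_append (mask16 v), crcBits_append]

-- ===== VERDICT (by name: the statement is the Claim_ definition above) =====
theorem computeCRCD3_spec : Claim_equal_computeCRCD3 := by
  intro u0 u1 u2 u3 u4 u5 u6 u7 _
  unfold Spec_computeCRCD3 computeCRCD3 computeCRCD3_alt
  simp only [List.foldl_cons, List.foldl_nil]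
  rw [band_mask_repr]
  rw [wordA, wordA, wordA, wordA, wordA, wordA, wordA]
  rw [show (PySem.Int.band u0 65535).toNat = mask16 u0 from rfl]
  have m0 := mask16_lt u0
  rw [wordB _ u1 m0]
  rw [wordB _ u2 (crcBits_lt _ _ m0)]
  rw [wordB _ u3 (crcBits_lt _ _ (crcBits_lt _ _ m0))]
  rw [wordB _ u4 (crcBits_lt _ _ (crcBits_lt _ _ (crcBits_lt _ _ m0)))]
  rw [wordB _ u5 (crcBits_lt _ _ (crcBits_lt _ _ (crcBits_lt _ _ (crcBits_lt _ _ m0))))]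
  rw [wordB _ u6 (crcBits_lt _ _ (crcBits_lt _ _ (crcBits_lt _ _ (crcBits_lt _ _ (crcBits_lt _ _ m0)))))]
  rw [wordB _ u7 (crcBits_lt _ _ (crcBits_lt _ _ (crcBits_lt _ _ (crcBits_lt _ _ (crcBits_lt _ _ (crcBits_lt _ _ m0))))))]
  rfl
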